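-- pv_equiv track=rewrite | github.com/matt08-prog/Advent_of_Code_2024_python | day_13/part_1.py | binary_search_find_multiple_of_value
-- ===== SOURCE A (Python) =====
-- def binary_search_find_multiple_of_value(target, low, high, a_mult):
--
--     mid = (high + low) // 2
--
--     # Check base case
--     if high >= low:
--
--         mid = (high + low) // 2
--
--         # If element is present at the middle itself
--         if target == mid * a_mult:
--             return [mid]
--
--         # If element is smaller than mid, then it can only
--         # be present in left subarray
--         elif target < mid * a_mult:
--             # print_i(f"{target}")
--             return binary_search_find_multiple_of_value(target, low, mid - 1, a_mult)
--
--         # Else the element can only be present in right subarray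
--         else:
--             return binary_search_find_multiple_of_value(target, mid + 1, high, a_mult)
--
--     else:
--         # Element is not present in the array
--         return [-1, mid]
-- ===== SOURCE B (Python) =====
-- def binary_search_find_multiple_of_value(target, low, high, a_mult):
--     # Iterative binary search over mutable low/high; mid is computed at the
--     # top of each iteration so the failure value [-1, mid] matches A.
--     while True:
--         mid = (high + low) // 2
--         if high < low:
--             return [-1, mid]
--         if target == mid * a_mult:
--             return [mid]
--         if target < mid * a_mult:
--             high = mid - 1
--         else:
--             low = mid + 1
-- ===== Notes on version B (the rewrite author's own statement) =====
-- stated objective: idiomatic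
-- what changed: Replaces A's recursion with an iterative while loop over mutable low/high, computing mid once at the top of each iteration and collapsing the nested if/elif/else into flat early returns.
import Mathlib
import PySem

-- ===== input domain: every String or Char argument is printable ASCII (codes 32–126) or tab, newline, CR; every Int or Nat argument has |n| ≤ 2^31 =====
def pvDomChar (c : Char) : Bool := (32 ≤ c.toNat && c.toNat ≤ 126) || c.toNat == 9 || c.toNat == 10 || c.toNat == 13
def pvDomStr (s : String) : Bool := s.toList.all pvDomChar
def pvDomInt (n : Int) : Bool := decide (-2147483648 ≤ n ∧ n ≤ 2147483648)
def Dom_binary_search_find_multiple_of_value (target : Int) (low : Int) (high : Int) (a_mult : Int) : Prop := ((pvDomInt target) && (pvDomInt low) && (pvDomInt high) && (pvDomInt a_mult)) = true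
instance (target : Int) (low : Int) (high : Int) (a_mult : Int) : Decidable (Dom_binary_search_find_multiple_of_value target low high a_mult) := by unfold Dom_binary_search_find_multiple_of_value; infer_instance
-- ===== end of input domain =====

-- B rewrites A's recursion as an iterative while loop (same comparisons, same midpoint,
-- flat early returns instead of nested if/elif/else); return values are identical.

-- ===== PORT A =====
-- literal port of A's recursion: mid computed (twice, as in the source), nested branches in order
def binary_search_find_multiple_of_value (target : Int) (low : Int) (high : Int) (a_mult : Int) : List Int :=
  let mid := PySem.Int.floordiv (high + low) 2
  if _h : high ≥ low then
    let mid := PySem.Int.floordiv (high + low) 2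
    if target = mid * a_mult then [mid]
    else if target < mid * a_mult then
      binary_search_find_multiple_of_value target low (mid - 1) a_mult
    else
      binary_search_find_multiple_of_value target (mid + 1) high a_mult
  else
    [-1, mid]
termination_by (high + 1 - low).toNat
decreasing_by
  · have hb := PySem.Int.floordiv_two_mid_bounds (lo := low) (hi := high) _h
    rw [Int.add_comm low high] at hb
    rw [Int.sub_add_cancel]
    exact (Int.toNat_lt_toNat (Int.sub_pos.mpr (Int.lt_add_one_of_le _h))).mpr
      (sub_lt_sub_right (Int.lt_add_one_of_le hb.2) low)
  · have hb := PySem.Int.floordiv_two_mid_bounds (lo := low) (hi := high) _h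
    rw [Int.add_comm low high] at hb
    exact (Int.toNat_lt_toNat (Int.sub_pos.mpr (Int.lt_add_one_of_le _h))).mpr
      (sub_lt_sub_left (Int.lt_add_one_of_le hb.1) (high + 1))

-- ===== PORT B =====
-- the 'while True' loop of Source B as a tail-recursive state transformer over (low, high)
def bsLoop (target : Int) (a_mult : Int) (low : Int) (high : Int) : List Int :=
  let mid := PySem.Int.floordiv (high + low) 2
  if _h : high < low then [-1, mid]
  else if target = mid * a_mult then [mid]
  else if target < mid * a_mult then bsLoop target a_mult low (mid - 1)
  else bsLoop target a_mult (mid + 1) high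
termination_by (high + 1 - low).toNat
decreasing_by
  · have hle : low ≤ high := Int.not_lt.mp _h
    have hb := PySem.Int.floordiv_two_mid_bounds (lo := low) (hi := high) hle
    rw [Int.add_comm low high] at hb
    rw [Int.sub_add_cancel]
    exact (Int.toNat_lt_toNat (Int.sub_pos.mpr (Int.lt_add_one_of_le hle))).mpr
      (sub_lt_sub_right (Int.lt_add_one_of_le hb.2) low)
  · have hle : low ≤ high := Int.not_lt.mp _h
    have hb := PySem.Int.floordiv_two_mid_bounds (lo := low) (hi := high) hle
    rw [Int.add_comm low high] at hb
    exact (Int.toNat_lt_toNat (Int.sub_pos.mpr (Int.lt_add_one_of_le hle))).mpr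
      (sub_lt_sub_left (Int.lt_add_one_of_le hb.1) (high + 1))

def binary_search_find_multiple_of_value_alt (target : Int) (low : Int) (high : Int) (a_mult : Int) : List Int :=
  bsLoop target a_mult low high

-- ===== PRECONDITION & SPEC =====
def Spec_binary_search_find_multiple_of_value (target : Int) (low : Int) (high : Int) (a_mult : Int) (out : List Int) : Prop := out = binary_search_find_multiple_of_value_alt target low high a_mult
instance (target : Int) (low : Int) (high : Int) (a_mult : Int) (out : List Int) : Decidable (Spec_binary_search_find_multiple_of_value target low high a_mult out) := by unfold Spec_binary_search_find_multiple_of_value; infer_instance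

-- ===== CLAIM (what is proved, stated in full; the proofs are below) =====
def Claim_equal_binary_search_find_multiple_of_value : Prop := ∀ (target : Int) (low : Int) (high : Int) (a_mult : Int), Dom_binary_search_find_multiple_of_value target low high a_mult → Spec_binary_search_find_multiple_of_value target low high a_mult (binary_search_find_multiple_of_value target low high a_mult)

-- ===== LEMMAS AND PROOFS =====

theorem bs_eq_loop (target low high a_mult : Int) :
    binary_search_find_multiple_of_value target low high a_mult = bsLoop target a_mult low high := by
  fun_induction binary_search_find_multiple_of_value target low high a_mult with
  | case1 low high _h mid heq =>
      rw [bsLoop, dif_neg (show ¬ high < low by omega), if_pos heq]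
  | case2 low high _h mid hne hlt ih =>
      rw [bsLoop, dif_neg (show ¬ high < low by omega), if_neg hne, if_pos hlt]
      exact ih
  | case3 low high _h mid hne hge ih =>
      rw [bsLoop, dif_neg (show ¬ high < low by omega), if_neg hne, if_neg hge]
      exact ih
  | case4 low high _h =>
      rw [bsLoop, dif_pos (by omega)]

-- ===== VERDICT (by name: the statement is the Claim_ definition above) =====
theorem binary_search_find_multiple_of_value_spec : Claim_equal_binary_search_find_multiple_of_value := by
  intro target low high a_mult _
  unfold Spec_binary_search_find_multiple_of_value binary_search_find_multiple_of_value_alt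
  exact bs_eq_loop target low high a_mult
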